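-- pv_equiv track=rewrite | github.com/lucadivit/HowIFixYouCode | part_2/hamming_code.py | _vector_matrix_product
-- ===== SOURCE A (Python) =====
-- from typing import List, Tuple
--
-- def _validate(bits: List[int]) -> None:
--     if not bits:
--         raise ValueError("Message must not be empty")
--     if any(bit not in (0, 1) for bit in bits):
--         raise ValueError("Message must be a list of 0 and 1")
--
-- def _vector_matrix_product(vector: List[int], matrix: List[List[int]]) -> List[int]:
--     _validate(bits=vector)
--     cols = len(matrix[0])
--     result = []
--     for col_idx in range(cols):
--         value = 0
--         for row_idx, bit in enumerate(vector):
--             value += bit * matrix[row_idx][col_idx]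
--         value = value % 2
--         result.append(value)
--     return result
-- ===== SOURCE B (Python) =====
-- from typing import List
--
-- def _validate(bits: List[int]) -> None:
--     if not bits:
--         raise ValueError("Message must not be empty")
--     if any(bit not in (0, 1) for bit in bits):
--         raise ValueError("Message must be a list of 0 and 1")
--
-- def _vector_matrix_product(vector: List[int], matrix: List[List[int]]) -> List[int]:
--     _validate(bits=vector)
--     result = [0] * len(matrix[0])
--     for row, bit in zip(matrix, vector):
--         if bit == 1:
--             result = [acc + x for acc, x in zip(result, row)]
--     return [v % 2 for v in result]
-- ===== Notes on version B (the rewrite author's own statement) =====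
-- stated objective: alternative
-- what changed: Instead of computing each output column with its own inner scan over the vector (column-major, per-column scalar), B keeps one accumulator vector, iterates row-major over zip(matrix, vector), adds a matrix row elementwise only when its bit is 1, and applies mod 2 once at the end.
import Mathlib
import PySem

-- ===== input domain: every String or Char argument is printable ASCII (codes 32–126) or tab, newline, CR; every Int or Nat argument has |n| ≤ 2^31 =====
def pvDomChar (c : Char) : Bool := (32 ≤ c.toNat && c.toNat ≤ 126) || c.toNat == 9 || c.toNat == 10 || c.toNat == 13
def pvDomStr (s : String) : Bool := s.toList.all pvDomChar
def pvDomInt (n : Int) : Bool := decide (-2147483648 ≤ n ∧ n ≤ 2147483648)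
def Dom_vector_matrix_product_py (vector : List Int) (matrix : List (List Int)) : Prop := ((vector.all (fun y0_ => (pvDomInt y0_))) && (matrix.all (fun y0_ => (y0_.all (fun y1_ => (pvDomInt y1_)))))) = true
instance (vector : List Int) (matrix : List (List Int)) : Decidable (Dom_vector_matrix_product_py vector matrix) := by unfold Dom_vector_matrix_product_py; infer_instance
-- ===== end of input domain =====

-- B builds the result as one accumulator vector: it skips rows whose bit is 0 and adds
-- selected matrix rows elementwise, taking mod 2 once at the end (objective: alternative
-- decomposition, row-major single accumulator instead of an independent per-column scan).

-- ===== PORT A =====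
def vector_matrix_product_py (vector : List Int) (matrix : List (List Int)) : List Int :=
  let cols := ((PySem.List.pyGet? matrix 0).getD []).length
  (PySem.List.pyRange 0 cols 1).foldl (fun result col_idx =>
    let value := (PySem.List.enumerate vector 0).foldl
      (fun value p =>
        value + p.2 * (PySem.List.pyGet? ((PySem.List.pyGet? matrix p.1).getD []) col_idx).getD 0) 0
    result ++ [PySem.Int.mod value 2]) []

-- ===== PORT B =====
def vector_matrix_product_py_alt (vector : List Int) (matrix : List (List Int)) : List Int :=
  let init := List.replicate ((PySem.List.pyGet? matrix 0).getD []).length (0 : Int)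
  ((matrix.zip vector).foldl (fun result p =>
      if p.2 == 1 then (result.zip p.1).map (fun q => q.1 + q.2) else result) init).map
    (fun v => PySem.Int.mod v 2)

-- ===== PRECONDITION & SPEC =====
-- Pre_ excludes exactly the inputs where A raises: ValueError from _validate (empty vector
-- or a non-0/1 bit) and IndexError from matrix indexing (empty matrix, or — when the first
-- row is nonempty — a vector longer than the matrix or one of the first len(vector) rows
-- shorter than the first row).
def Pre_vector_matrix_product_py (vector : List Int) (matrix : List (List Int)) : Prop :=
  vector ≠ [] ∧ (∀ b ∈ vector, b = 0 ∨ b = 1) ∧ matrix ≠ [] ∧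
    (matrix.headI.length = 0 ∨
      (vector.length ≤ matrix.length ∧
        ∀ row ∈ matrix.take vector.length, matrix.headI.length ≤ row.length))
instance (vector : List Int) (matrix : List (List Int)) : Decidable (Pre_vector_matrix_product_py vector matrix) := by unfold Pre_vector_matrix_product_py; infer_instance

def pvWitness_vector_matrix_product_py : List Int × List (List Int) :=
  ([1, 0, 1], [[1, 0], [1, 1], [0, 1]])

def Spec_vector_matrix_product_py (vector : List Int) (matrix : List (List Int)) (out : List Int) : Prop := out = vector_matrix_product_py_alt vector matrix
instance (vector : List Int) (matrix : List (List Int)) (out : List Int) : Decidable (Spec_vector_matrix_product_py vector matrix out) := by unfold Spec_vector_matrix_product_py; infer_instance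

-- ===== CLAIM (what is proved, stated in full; the proofs are below) =====
def Claim_equal_vector_matrix_product_py : Prop := ∀ (vector : List Int) (matrix : List (List Int)), Dom_vector_matrix_product_py vector matrix → Pre_vector_matrix_product_py vector matrix → Spec_vector_matrix_product_py vector matrix (vector_matrix_product_py vector matrix)

-- ===== LEMMAS AND PROOFS =====

-- A's outer loop appends one element per column: it is a map.
theorem foldl_append_map {α β : Type} (f : α → β) :
    ∀ (l : List α) (init : List β),
      l.foldl (fun r x => r ++ [f x]) init = init ++ l.map f := by
  intro l
  induction l with
  | nil => simp
  | cons x xs ih => intro init; simp [List.foldl_cons, ih]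

-- zipping only consumes the first |bs| elements of as.
theorem zip_eq_take_zip {α β : Type} :
    ∀ (as : List α) (bs : List β), as.zip bs = (as.take bs.length).zip bs := by
  intro as
  induction as with
  | nil => simp
  | cons a as ih =>
      intro bs
      cases bs with
      | nil => simp
      | cons b bs => simp [List.zip_cons_cons, ih bs]

-- A's inner loop over enumerate(vector), indexing matrix at s, s+1, …, equals a fold
-- over (matrix.drop s).zip bits.
theorem aInner_eq_zip (matrix : List (List Int)) (c : Int) :
    ∀ (bits : List Int) (s : Nat) (v : Int), s + bits.length ≤ matrix.length →
      (PySem.List.enumerate bits (s : Int)).foldl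
          (fun v p =>
            v + p.2 * (PySem.List.pyGet? ((PySem.List.pyGet? matrix p.1).getD []) c).getD 0) v
        = ((matrix.drop s).zip bits).foldl
            (fun v q => v + q.2 * (PySem.List.pyGet? q.1 c).getD 0) v := by
  intro bits
  induction bits with
  | nil => intro s v _; simp [PySem.List.enumerate_nil]
  | cons b bs ih =>
      intro s v hlen
      have hs : s < matrix.length := by simp at hlen; omega
      have hdrop : matrix.drop s = matrix[s] :: matrix.drop (s + 1) :=
        List.drop_eq_getElem_cons hs
      rw [PySem.List.enumerate_cons, hdrop]
      simp only [List.zip_cons_cons, List.foldl_cons]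
      have : ((s : Int) + 1) = ((s + 1 : Nat) : Int) := by push_cast; ring
      rw [this, ih (s + 1) _ (by simp at hlen ⊢; omega)]
      simp [hs]

-- pull a constant head summand out of the additive fold
theorem foldl_add_pull {α : Type} (g : α → Int) :
    ∀ (l : List α) (a : Int),
      l.foldl (fun v q => v + g q) a = a + l.foldl (fun v q => v + g q) 0 := by
  intro l
  induction l with
  | nil => simp
  | cons q l ih =>
      intro a
      simp only [List.foldl_cons]
      rw [ih (a + g q), ih (0 + g q)]
      ring

-- B's accumulator fold, read off pointwise.
theorem bfold_eq_map :
    ∀ (pairs : List (List Int × Int)) (acc : List Int),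
      (∀ p ∈ pairs, p.2 = 0 ∨ p.2 = 1) →
      (∀ p ∈ pairs, acc.length ≤ p.1.length) →
      pairs.foldl (fun result p =>
          if p.2 == 1 then (result.zip p.1).map (fun q => q.1 + q.2) else result) acc
        = (List.range acc.length).map (fun j =>
            acc.getD j 0 + pairs.foldl
              (fun v q => v + q.2 * (PySem.List.pyGet? q.1 (j : Int)).getD 0) 0) := by
  intro pairs
  induction pairs with
  | nil =>
      intro acc _ _
      simp only [List.foldl_nil]
      apply List.ext_getElem (by simp)
      intro j h1 h2
      simp at h2
      simp [h2]
  | cons p ps ih =>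
      intro acc hbits hlen
      have hplen : acc.length ≤ p.1.length := hlen p (by simp)
      simp only [List.foldl_cons]
      rcases hbits p (by simp) with h0 | h1
      · -- bit 0: accumulator unchanged, contribution 0
        rw [if_neg (by simp [h0])]
        rw [ih acc (fun q hq => hbits q (by simp [hq])) (fun q hq => hlen q (by simp [hq]))]
        apply List.map_congr_left
        intro j _
        rw [foldl_add_pull (fun q => q.2 * (PySem.List.pyGet? q.1 (j : Int)).getD 0) ps
          (0 + p.2 * (PySem.List.pyGet? p.1 (j : Int)).getD 0)]
        simp [h0]
      · -- bit 1: add the row elementwise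
        rw [if_pos (by simp [h1])]
        have hlen' : ((acc.zip p.1).map (fun q => q.1 + q.2)).length = acc.length := by
          simp; omega
        rw [ih _ (fun q hq => hbits q (by simp [hq]))
          (fun q hq => by rw [hlen']; exact hlen q (by simp [hq]))]
        rw [hlen']
        apply List.map_congr_left
        intro j hj
        simp only [List.mem_range] at hj
        have hj' : j < p.1.length := lt_of_lt_of_le hj hplen
        rw [foldl_add_pull (fun q => q.2 * (PySem.List.pyGet? q.1 (j : Int)).getD 0) ps
          (0 + p.2 * (PySem.List.pyGet? p.1 (j : Int)).getD 0)]
        have : ((acc.zip p.1).map (fun q => q.1 + q.2)).getD j 0 = acc[j]! + p.1[j]! := by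
          rw [List.getD_eq_getElem _ _ (by rw [hlen']; exact hj)]
          simp [List.getElem_zip, hj, hj', List.getElem!_eq_getElem?_getD,
            List.getElem?_eq_getElem]
        rw [this]
        rw [List.getD_eq_getElem _ _ hj]
        simp [h1, PySem.List.pyGet?_natCast, hj', List.getElem?_eq_getElem,
          List.getElem!_eq_getElem?_getD]
        rw [List.getElem?_eq_getElem hj]
        simp only [Option.getD_some]
        ring

theorem vector_matrix_product_py_spec : Claim_equal_vector_matrix_product_py := by
  intro vector matrix _ hpre
  obtain ⟨hvne, hbits, hmne, hshape⟩ := hpre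
  obtain ⟨r0, mrest, rfl⟩ : ∃ r0 mrest, matrix = r0 :: mrest := by
    cases matrix with
    | nil => exact absurd rfl hmne
    | cons a l => exact ⟨a, l, rfl⟩
  simp only [List.headI] at hshape
  show Spec_vector_matrix_product_py _ _ _
  unfold Spec_vector_matrix_product_py vector_matrix_product_py vector_matrix_product_py_alt
  have hhead : (PySem.List.pyGet? (r0 :: mrest) 0).getD [] = r0 := by
    simp [PySem.List.pyGet?, PySem.List.pyIdx?]
  simp only [hhead]
  -- rewrite A into a map over columns
  rw [foldl_append_map, List.nil_append]
  have hrange : PySem.List.pyRange 0 (r0.length : Int) 1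
      = List.map (fun k : Nat => (k : Int)) (List.range r0.length) := by
    rw [PySem.List.pyRange_one]
    apply List.map_congr_left
    intro a _
    omega
  rw [hrange, List.map_map]
  -- B side via bfold_eq_map
  have hzip : (r0 :: mrest).zip vector = ((r0 :: mrest).take vector.length).zip vector :=
    zip_eq_take_zip _ vector
  have hrows : ∀ p ∈ (r0 :: mrest).zip vector, r0.length ≤ p.1.length := by
    intro p hp
    rcases hshape with h | ⟨_, hr⟩
    · simp [h]
    · rw [hzip] at hp
      exact hr p.1 (List.of_mem_zip hp).1
  have hbits' : ∀ p ∈ (r0 :: mrest).zip vector, p.2 = 0 ∨ p.2 = 1 := by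
    intro p hp; exact hbits p.2 (List.of_mem_zip hp).2
  rw [bfold_eq_map ((r0 :: mrest).zip vector) (List.replicate r0.length 0) hbits'
    (fun p hp => by simpa using hrows p hp)]
  rw [List.length_replicate, List.map_map]
  apply List.map_congr_left
  intro j hj
  simp only [List.mem_range] at hj
  simp only [Function.comp]
  congr 1
  -- A's inner sum equals B's zip sum at column j
  have hveclen : vector.length ≤ (r0 :: mrest).length := by
    rcases hshape with h | ⟨h, _⟩
    · omega
    · exact h
  have hA := aInner_eq_zip (r0 :: mrest) (j : Int) vector 0 0 (by simpa using hveclen)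
  simp only [Nat.cast_zero] at hA
  rw [hA, List.drop_zero]
  rw [List.getD_replicate _ hj]
  rw [zero_add]
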